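-- pv_equiv track=rewrite | github.com/dbreunig/just-bash-py | src/just_bash/commands/read/read.py | _split_on_ifs
-- ===== SOURCE A (Python) =====
-- def _split_on_ifs(value: str, ifs: str) -> list[str]:
--     """Split a string on IFS characters.
--
--     Follows bash IFS splitting rules:
--     - IFS whitespace (space, tab, newline): leading/trailing stripped,
--       consecutive act as single separator
--     - IFS non-whitespace: each occurrence is a separator, consecutive
--       produce empty fields
--     - Mixed: whitespace adjacent to non-whitespace is part of the delimiter
--     """
--     if not value:
--         return []
--
--     ifs_ws = set(c for c in ifs if c in " \t\n")
--     ifs_nonws = set(c for c in ifs if c not in " \t\n")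
--
--     # Whitespace-only IFS: simple split (strips leading/trailing, merges consecutive)
--     if not ifs_nonws:
--         return value.split()
--
--     result = []
--     current = []
--     pos = 0
--
--     # Skip leading IFS whitespace
--     while pos < len(value) and value[pos] in ifs_ws:
--         pos += 1
--
--     while pos < len(value):
--         c = value[pos]
--         if c in ifs_nonws:
--             # Non-whitespace delimiter: always produces field boundary
--             result.append("".join(current))
--             current = []
--             pos += 1
--             # Skip trailing IFS whitespace after non-ws delimiter
--             while pos < len(value) and value[pos] in ifs_ws:
--                 pos += 1
--         elif c in ifs_ws:
--             # IFS whitespace - check for composite delimiter (ws + nonws)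
--             if current:
--                 saved = "".join(current)
--                 current = []
--             else:
--                 saved = None
--             # Skip consecutive whitespace
--             while pos < len(value) and value[pos] in ifs_ws:
--                 pos += 1
--             # Check if followed by non-ws delimiter (composite delimiter)
--             if pos < len(value) and value[pos] in ifs_nonws:
--                 # Composite: ws + nonws counted as one delimiter
--                 if saved is not None:
--                     result.append(saved)
--                 pos += 1  # consume the nonws char
--                 # Skip trailing whitespace after nonws
--                 while pos < len(value) and value[pos] in ifs_ws:
--                     pos += 1
--             else:
--                 if saved is not None:
--                     result.append(saved)
--         else:
--             current.append(c)
--             pos += 1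
--
--     # Add last field if non-empty
--     if current:
--         result.append("".join(current))
--
--     return result
-- ===== SOURCE B (Python) =====
-- def _split_on_ifs(value: str, ifs: str) -> list[str]:
--     """Split a string on IFS characters (bash rules) — one field emitted per
--     outer iteration via span/skip index helpers, no per-char accumulator."""
--     if not value:
--         return []
--     ws = {c for c in ifs if c in " \t\n"}
--     nonws = {c for c in ifs if c not in " \t\n"}
--     if not nonws:
--         return value.split()
--     n = len(value)
--
--     def skip_ws(i: int) -> int:
--         while i < n and value[i] in ws:
--             i += 1
--         return i
--
--     out = []
--     i = skip_ws(0)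
--     while i < n:
--         j = i
--         while j < n and value[j] not in ws and value[j] not in nonws:
--             j += 1
--         out.append(value[i:j])
--         j = skip_ws(j)
--         if j < n and value[j] in nonws:
--             j = skip_ws(j + 1)
--         i = j
--     return out
-- ===== Notes on version B (the rewrite author's own statement) =====
-- stated objective: alternative
-- what changed: Replaces A's char-by-char state machine (current-accumulator, saved-field and composite-delimiter branches) with a two-level scan that emits one whole field per outer iteration: span to the next IFS char, slice the field out, then consume one delimiter (ws*, optional nonws, ws*).
import Mathlib
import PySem

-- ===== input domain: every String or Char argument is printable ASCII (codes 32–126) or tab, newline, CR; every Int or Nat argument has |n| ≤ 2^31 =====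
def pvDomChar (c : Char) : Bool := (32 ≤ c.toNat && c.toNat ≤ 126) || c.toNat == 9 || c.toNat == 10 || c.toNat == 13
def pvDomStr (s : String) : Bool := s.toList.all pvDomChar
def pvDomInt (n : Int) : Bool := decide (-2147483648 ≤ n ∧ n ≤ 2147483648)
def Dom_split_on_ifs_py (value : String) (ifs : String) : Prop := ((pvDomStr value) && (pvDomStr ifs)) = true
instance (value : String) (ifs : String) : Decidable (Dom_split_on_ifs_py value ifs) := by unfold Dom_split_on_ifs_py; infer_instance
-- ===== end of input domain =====

-- B replaces A's char-by-char state machine (current/saved accumulators, composite-delimiter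
-- branches) by a scan that emits one whole field per step: span to the next IFS char, then
-- consume one delimiter (ws*, optional non-ws, ws*).  Objective: alternative (same O(n) cost).

-- ===== PORT A =====
def pyA_skipWs (ws : List Char) : List Char → List Char
  | [] => []
  | c :: rest => if c ∈ ws then pyA_skipWs ws rest else c :: rest

theorem pyA_skipWs_length (ws : List Char) (l : List Char) :
    (pyA_skipWs ws l).length ≤ l.length := by
  induction l with
  | nil => simp [pyA_skipWs]
  | cons c rest ih =>
    simp only [pyA_skipWs]
    split_ifs <;> simp <;> omega

def pyA_headIn : List Char → List Char → Bool
  | [], _ => false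
  | c :: _, s => decide (c ∈ s)

-- the two while-loops of A over position `pos`, carried as the suffix `s = value[pos:]`
def pyA_loop (ws nonws : List Char) (s : List Char) (result : List String) (current : List Char) :
    List String :=
  match s with
  | [] => if current ≠ [] then result ++ [String.mk current] else result
  | c :: rest =>
    if c ∈ nonws then
      pyA_loop ws nonws (pyA_skipWs ws rest) (result ++ [String.mk current]) []
    else if c ∈ ws then
      -- saved = "".join(current) if current else None; appended when not None
      if pyA_headIn (pyA_skipWs ws rest) nonws then
        pyA_loop ws nonws (pyA_skipWs ws (pyA_skipWs ws rest).tail)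
          (if current ≠ [] then result ++ [String.mk current] else result) []
      else
        pyA_loop ws nonws (pyA_skipWs ws rest)
          (if current ≠ [] then result ++ [String.mk current] else result) []
    else
      pyA_loop ws nonws rest result (current ++ [c])
termination_by s.length
decreasing_by
  · have := pyA_skipWs_length ws rest; simp; omega
  · have h1 := pyA_skipWs_length ws (pyA_skipWs ws rest).tail
    have h2 := pyA_skipWs_length ws rest
    have h3 : (pyA_skipWs ws rest).tail.length ≤ (pyA_skipWs ws rest).length := by
      cases pyA_skipWs ws rest <;> simp
    simp; omega
  · have := pyA_skipWs_length ws rest; simp; omega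
  · simp

def split_on_ifs_py (value : String) (ifs : String) : List String :=
  if value = "" then []
  else
    let ifs_ws := PySem.Set.ofList (ifs.toList.filter (fun c => decide (c ∈ ([' ', '\t', '\n'] : List Char))))
    let ifs_nonws := PySem.Set.ofList (ifs.toList.filter (fun c => decide (c ∉ ([' ', '\t', '\n'] : List Char))))
    if ifs_nonws = [] then PySem.Str.split₀ value
    else pyA_loop ifs_ws ifs_nonws (pyA_skipWs ifs_ws value.toList) [] []

-- ===== PORT B =====
def altSkipWs (ws : List Char) : List Char → List Char
  | [] => []
  | c :: rest => if c ∈ ws then altSkipWs ws rest else c :: rest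

def altHeadIn : List Char → List Char → Bool
  | [], _ => false
  | c :: _, s => decide (c ∈ s)

-- inner while-loop of B: value[i:j], value[j:] for the j-scan from i
def altSpan (ws nonws : List Char) : List Char → List Char × List Char
  | [] => ([], [])
  | c :: rest =>
    if c ∈ ws ∨ c ∈ nonws then ([], c :: rest)
    else (c :: (altSpan ws nonws rest).1, (altSpan ws nonws rest).2)

-- delimiter consumption after a field: ws*, one optional non-ws, ws*
def altNext (ws nonws : List Char) (r : List Char) : List Char :=
  if altHeadIn (altSkipWs ws r) nonws then altSkipWs ws (altSkipWs ws r).tail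
  else altSkipWs ws r

theorem altSkipWs_length (ws : List Char) (l : List Char) :
    (altSkipWs ws l).length ≤ l.length := by
  induction l with
  | nil => simp [altSkipWs]
  | cons c rest ih =>
    simp only [altSkipWs]
    split_ifs <;> simp <;> omega

theorem altNext_length (ws nonws : List Char) (r : List Char) :
    (altNext ws nonws r).length ≤ r.length := by
  unfold altNext
  have h1 := altSkipWs_length ws r
  have h2 := altSkipWs_length ws (altSkipWs ws r).tail
  have h3 : (altSkipWs ws r).tail.length ≤ (altSkipWs ws r).length := by
    cases altSkipWs ws r <;> simp
  split_ifs <;> omega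

theorem altSpan_snd_length (ws nonws : List Char) (l : List Char) :
    (altSpan ws nonws l).2.length ≤ l.length := by
  induction l with
  | nil => simp [altSpan]
  | cons c rest ih =>
    simp only [altSpan]
    split_ifs <;> simp <;> omega

theorem altStep_lt (ws nonws : List Char) (c : Char) (rest : List Char) :
    (altNext ws nonws (altSpan ws nonws (c :: rest)).2).length < (c :: rest).length := by
  by_cases h : c ∈ ws ∨ c ∈ nonws
  · rw [altSpan, if_pos h]
    have := altNext_length ws nonws (c :: rest)
    by_cases hw : c ∈ ws
    · have hskip : altSkipWs ws (c :: rest) = altSkipWs ws rest := by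
        rw [altSkipWs, if_pos hw]
      unfold altNext
      rw [hskip]
      have h1 := altSkipWs_length ws rest
      have h2 := altSkipWs_length ws (altSkipWs ws rest).tail
      have h3 : (altSkipWs ws rest).tail.length ≤ (altSkipWs ws rest).length := by
        cases altSkipWs ws rest <;> simp
      split_ifs <;> simp <;> omega
    · have hn : c ∈ nonws := h.resolve_left hw
      have hskip : altSkipWs ws (c :: rest) = c :: rest := by
        rw [altSkipWs, if_neg hw]
      unfold altNext
      rw [hskip, altHeadIn, if_pos (by simpa using hn)]
      have h1 := altSkipWs_length ws rest
      simp; omega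
  · rw [altSpan, if_neg h]
    have h1 := altSpan_snd_length ws nonws rest
    have h2 := altNext_length ws nonws (altSpan ws nonws rest).2
    simp; omega

-- outer while-loop of B: one field per iteration
def altFields (ws nonws : List Char) (s : List Char) : List String :=
  if h : s = [] then []
  else
    String.mk (altSpan ws nonws s).1 ::
      altFields ws nonws (altNext ws nonws (altSpan ws nonws s).2)
termination_by s.length
decreasing_by
  cases s with
  | nil => exact absurd rfl h
  | cons c rest => exact altStep_lt ws nonws c rest

def split_on_ifs_py_alt (value : String) (ifs : String) : List String :=
  if value = "" then []
  else
    let ws := PySem.Set.ofList (ifs.toList.filter (fun c => decide (c ∈ ([' ', '\t', '\n'] : List Char))))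
    let nonws := PySem.Set.ofList (ifs.toList.filter (fun c => decide (c ∉ ([' ', '\t', '\n'] : List Char))))
    if nonws = [] then PySem.Str.split₀ value
    else altFields ws nonws (altSkipWs ws value.toList)

-- ===== PRECONDITION & SPEC =====
def Spec_split_on_ifs_py (value : String) (ifs : String) (out : List String) : Prop := out = split_on_ifs_py_alt value ifs
instance (value : String) (ifs : String) (out : List String) : Decidable (Spec_split_on_ifs_py value ifs out) := by unfold Spec_split_on_ifs_py; infer_instance

-- ===== CLAIM (what is proved, stated in full; the proofs are below) =====
def Claim_equal_split_on_ifs_py : Prop := ∀ (value : String) (ifs : String), Dom_split_on_ifs_py value ifs → Spec_split_on_ifs_py value ifs (split_on_ifs_py value ifs)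

-- ===== LEMMAS AND PROOFS =====

theorem altSkipWs_eq (ws : List Char) (l : List Char) : altSkipWs ws l = pyA_skipWs ws l := by
  induction l with
  | nil => rfl
  | cons c rest ih => rw [altSkipWs, pyA_skipWs, ih]

theorem pyA_headIn_eq (l s : List Char) : pyA_headIn l s = altHeadIn l s := rfl

theorem skipWs_head (ws : List Char) (l : List Char) :
    altHeadIn (pyA_skipWs ws l) ws = false := by
  induction l with
  | nil => rfl
  | cons c rest ih =>
    rw [pyA_skipWs]
    split_ifs with h
    · exact ih
    · simpa [altHeadIn] using h

theorem altSpan_append_free (ws nonws : List Char) (pre t : List Char)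
    (hfree : ∀ c ∈ pre, ¬ (c ∈ ws ∨ c ∈ nonws)) :
    altSpan ws nonws (pre ++ t) = (pre ++ (altSpan ws nonws t).1, (altSpan ws nonws t).2) := by
  induction pre with
  | nil => simp
  | cons c pre ih =>
    have hc : ¬ (c ∈ ws ∨ c ∈ nonws) := hfree c (by simp)
    rw [List.cons_append, altSpan, if_neg hc, ih (fun d hd => hfree d (by simp [hd]))]
    simp

theorem altSpan_ifs_head (ws nonws : List Char) (c : Char) (rest : List Char)
    (h : c ∈ ws ∨ c ∈ nonws) :
    altSpan ws nonws (c :: rest) = ([], c :: rest) := by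
  rw [altSpan, if_pos h]

-- altFields on a pure-field string (used for the end of A's loop)
theorem altFields_free (ws nonws : List Char) (cur : List Char) (hne : cur ≠ [])
    (hfree : ∀ c ∈ cur, ¬ (c ∈ ws ∨ c ∈ nonws)) :
    altFields ws nonws cur = [String.mk cur] := by
  rw [altFields, dif_neg hne]
  have hs : altSpan ws nonws cur = (cur, []) := by
    have := altSpan_append_free ws nonws cur [] hfree
    simpa [altSpan] using this
  rw [hs]
  rw [show altNext ws nonws ([] : List Char) = [] from rfl]
  rw [altFields, dif_pos rfl]

-- B's one step on a string that starts with the field `current` followed by an IFS char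
theorem altFields_step (ws nonws : List Char) (current : List Char) (c : Char) (rest : List Char)
    (hfree : ∀ c ∈ current, ¬ (c ∈ ws ∨ c ∈ nonws)) (hifs : c ∈ ws ∨ c ∈ nonws) :
    altFields ws nonws (current ++ c :: rest)
      = String.mk current :: altFields ws nonws (altNext ws nonws (c :: rest)) := by
  rw [altFields, dif_neg (by simp)]
  rw [altSpan_append_free ws nonws current (c :: rest) hfree,
      altSpan_ifs_head ws nonws c rest hifs]
  simp

-- main invariant: A's loop, started with accumulated field `current`, produces
-- result ++ B's fields of (current ++ s)
theorem loop_eq (ws nonws : List Char) (hdj : ∀ c, c ∈ nonws → c ∉ ws) :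
    ∀ (n : Nat) (s : List Char), s.length ≤ n → ∀ (current : List Char) (result : List String),
      (∀ c ∈ current, ¬ (c ∈ ws ∨ c ∈ nonws)) →
      (current = [] → altHeadIn s ws = false) →
      pyA_loop ws nonws s result current = result ++ altFields ws nonws (current ++ s) := by
  intro n
  induction n with
  | zero =>
    intro s hs current result hfree hhead
    have hsnil : s = [] := by cases s <;> simp_all
    subst hsnil
    rw [pyA_loop]
    by_cases hcur : current = []
    · subst hcur; simp [altFields]
    · rw [if_pos hcur, List.append_nil, altFields_free ws nonws current hcur hfree]
  | succ n ih =>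
    intro s hs current result hfree hhead
    cases s with
    | nil =>
      rw [pyA_loop]
      by_cases hcur : current = []
      · subst hcur; simp [altFields]
      · rw [if_pos hcur, List.append_nil, altFields_free ws nonws current hcur hfree]
    | cons c rest =>
      simp only [List.length_cons, Nat.succ_le_succ_iff] at hs
      by_cases hc1 : c ∈ nonws
      · -- non-whitespace delimiter
        have hcw : c ∉ ws := hdj c hc1
        rw [pyA_loop, if_pos hc1]
        rw [altFields_step ws nonws current c rest hfree (Or.inr hc1)]
        have hnext : altNext ws nonws (c :: rest) = pyA_skipWs ws rest := by
          unfold altNext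
          rw [show altSkipWs ws (c :: rest) = c :: rest by rw [altSkipWs, if_neg hcw]]
          rw [altHeadIn, if_pos (by simpa using hc1)]
          simp [altSkipWs_eq]
        rw [hnext]
        rw [ih (pyA_skipWs ws rest) (le_trans (pyA_skipWs_length ws rest) hs) [] _
              (by intro d hd; simp at hd) (fun _ => skipWs_head ws rest)]
        simp
      · by_cases hc2 : c ∈ ws
        · -- whitespace: current must be non-empty
          have hcur : current ≠ [] := by
            intro hnil
            have := hhead hnil
            simp [altHeadIn, hc2] at this
          rw [pyA_loop, if_neg hc1, if_pos hc2]
          rw [altFields_step ws nonws current c rest hfree (Or.inl hc2)]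
          have hr1 : altSkipWs ws (c :: rest) = pyA_skipWs ws rest := by
            rw [altSkipWs, if_pos hc2, altSkipWs_eq]
          by_cases hnw : pyA_headIn (pyA_skipWs ws rest) nonws
          · rw [if_pos hnw, if_pos hcur]
            have hnext : altNext ws nonws (c :: rest)
                = pyA_skipWs ws (pyA_skipWs ws rest).tail := by
              unfold altNext
              rw [hr1, ← pyA_headIn_eq, if_pos hnw, altSkipWs_eq]
            rw [hnext]
            rw [ih (pyA_skipWs ws (pyA_skipWs ws rest).tail)
                  (le_trans (pyA_skipWs_length ws _)
                    (le_trans (by cases pyA_skipWs ws rest <;> simp)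
                      (le_trans (pyA_skipWs_length ws rest) hs))) [] _
                  (by intro d hd; simp at hd) (fun _ => skipWs_head ws _)]
            simp
          · rw [if_neg hnw, if_pos hcur]
            have hnext : altNext ws nonws (c :: rest) = pyA_skipWs ws rest := by
              unfold altNext
              rw [hr1, ← pyA_headIn_eq, if_neg hnw]
            rw [hnext]
            rw [ih (pyA_skipWs ws rest) (le_trans (pyA_skipWs_length ws rest) hs) [] _
                  (by intro d hd; simp at hd) (fun _ => skipWs_head ws rest)]
            simp
        · -- ordinary character
          rw [pyA_loop, if_neg hc1, if_neg hc2]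
          rw [ih rest hs (current ++ [c]) result
                (by intro d hd
                    rcases List.mem_append.mp hd with h | h
                    · exact hfree d h
                    · simp at h; subst h; tauto)
                (by intro h; simp at h)]
          rw [List.append_assoc, List.singleton_append]

-- ===== VERDICT (by name: the statement is the Claim_ definition above) =====
theorem split_on_ifs_py_spec : Claim_equal_split_on_ifs_py := by
  intro value ifs _
  unfold Spec_split_on_ifs_py split_on_ifs_py split_on_ifs_py_alt
  by_cases hv : value = ""
  · simp [hv]
  · rw [if_neg hv, if_neg hv]
    simp only []
    set wsl := PySem.Set.ofList (ifs.toList.filter (fun c => decide (c ∈ ([' ', '\t', '\n'] : List Char)))) with hws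
    set nwl := PySem.Set.ofList (ifs.toList.filter (fun c => decide (c ∉ ([' ', '\t', '\n'] : List Char)))) with hnw
    by_cases hn : nwl = []
    · rw [if_pos hn, if_pos hn]
    · rw [if_neg hn, if_neg hn]
      have hdj : ∀ c, c ∈ nwl → c ∉ wsl := by
        intro c hc hcw
        rw [hnw] at hc
        rw [hws] at hcw
        rw [PySem.Set.mem_ofList, List.mem_filter] at hc hcw
        simp at hc hcw
        tauto
      rw [altSkipWs_eq]
      have := loop_eq wsl nwl hdj (pyA_skipWs wsl value.toList).length _ le_rfl [] []
        (by intro d hd; simp at hd) (fun _ => skipWs_head wsl value.toList)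
      simpa using this
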